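-- pv_equiv track=rewrite | github.com/AIRsummer/share_ai_cr | AI_CR_PLAN_parser_scikit_learn/ai_cr_tools/feature_extractor.py | _calculate_inheritance_depth
-- ===== SOURCE A (Python) =====
-- from typing import Dict, List, Any, Tuple
--
-- def _calculate_inheritance_depth(classes: List[Dict]) -> int:
--     """计算继承深度"""
--     max_depth = 0
--
--     for cls in classes:
--         depth = 1
--         current_extends = cls.get('extends')
--
--         # 简单的继承深度计算（在当前类列表中查找）
--         while current_extends:
--             found = False
--             for other_cls in classes:
--                 if other_cls.get('name') == current_extends:
--                     depth += 1
--                     current_extends = other_cls.get('extends')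
--                     found = True
--                     break
--             if not found:
--                 depth += 1  # 假设继承了外部类
--                 break
--
--         max_depth = max(max_depth, depth)
--
--     return max_depth
-- ===== SOURCE B (Python) =====
-- def _calculate_inheritance_depth(classes):
--     # Different algorithm: one name->extends map built up front, plus a shared
--     # memo of chain values filled back-to-front along each walked path, so every
--     # class name's chain value is computed at most once across the whole list.
--     parent = {}
--     for cls in classes:
--         n = cls.get('name')
--         if n is not None and n not in parent:
--             parent[n] = cls.get('extends')
--
--     memo = {}  # class name -> value of the chain starting at that name
--
--     def chain_value(ext):
--         # walk only the uncached prefix of the chain, then fill the cache back-to-front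
--         path = []
--         while ext and ext in parent and ext not in memo:
--             path.append(ext)
--             ext = parent[ext]
--         base = memo[ext] if (ext and ext in parent) else (1 if ext else 0)
--         for name in reversed(path):
--             base += 1
--             memo[name] = base
--         return base
--
--     best = 0
--     for cls in classes:
--         best = max(best, 1 + chain_value(cls.get('extends')))
--     return best
-- ===== Notes on version B (the rewrite author's own statement) =====
-- stated objective: alternative
-- what changed: A rescans the whole class list at every step of every chain; B builds a name->extends map once and computes each name's chain value at most once, using an explicit path stack and a shared memo table filled back-to-front, instead of A's nested rescan loops.
import Mathlib
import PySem

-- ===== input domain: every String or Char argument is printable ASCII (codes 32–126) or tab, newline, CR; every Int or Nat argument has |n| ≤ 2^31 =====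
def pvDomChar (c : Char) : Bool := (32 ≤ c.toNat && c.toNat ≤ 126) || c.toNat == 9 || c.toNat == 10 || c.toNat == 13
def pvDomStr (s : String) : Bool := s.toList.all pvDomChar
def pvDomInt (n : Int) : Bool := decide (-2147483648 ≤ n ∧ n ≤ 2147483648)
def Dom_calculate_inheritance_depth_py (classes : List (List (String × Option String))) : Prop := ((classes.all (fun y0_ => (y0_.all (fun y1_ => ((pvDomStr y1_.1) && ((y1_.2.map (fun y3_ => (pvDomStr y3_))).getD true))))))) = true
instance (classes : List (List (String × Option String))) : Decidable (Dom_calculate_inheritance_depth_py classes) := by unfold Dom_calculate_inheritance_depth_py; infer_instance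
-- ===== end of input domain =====

-- B builds a name→extends map once and computes each name's chain value at most once,
-- via an explicit path stack and a shared memo table filled back-to-front (objective: alternative).
-- A diverges (infinite while loop) on cyclic extends chains; those inputs are outside Pre_.

-- cls.get(k): first-match lookup in the association list, missing key/None both → none
def pvDGet (c : List (String × Option String)) (k : String) : Option String :=
  ((PySem.Dict.mk c).get? k).getD none

-- Python truthiness of a str-or-None value
def pvTruthy (o : Option String) : Bool :=
  match o with
  | none => false
  | some s => s ≠ ""

-- ===== PORT A =====
-- the inner `while current_extends:` loop of A (fuel = classes.length + 1, ample on Pre_)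
def aChain (classes : List (List (String × Option String))) :
    Nat → Option String → Int → Int
  | 0, _, depth => depth
  | fuel + 1, cur, depth =>
    if pvTruthy cur then
      -- `for other_cls in classes: … break` = first class whose 'name' equals cur
      match classes.find? (fun c => pvDGet c "name" == cur) with
      | some c => aChain classes fuel (pvDGet c "extends") (depth + 1)
      | none => depth + 1   -- not found: assume external class, break
    else depth

def calculate_inheritance_depth_py (classes : List (List (String × Option String))) : Int :=
  classes.foldl
    (fun max_depth cls =>
      max max_depth (aChain classes (classes.length + 1) (pvDGet cls "extends") 1))
    0

-- ===== PORT B =====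
-- first loop of B: first-occurrence name → extends dictionary
def bParent (classes : List (List (String × Option String))) :
    PySem.Dict String (Option String) :=
  classes.foldl
    (fun parent cls =>
      match pvDGet cls "name" with
      | some n => if parent.contains n then parent else parent.insert n (pvDGet cls "extends")
      | none => parent)
    PySem.Dict.empty

-- B's `while ext and ext in parent and ext not in memo:` collecting `path`
-- (`ext in parent` ported as matching parent.get?, whose isSome is Python's `in`;
--  fuel = classes.length + 1, ample on Pre_)
def bCollect (P : PySem.Dict String (Option String)) (memo : PySem.Dict String Int) :
    Nat → Option String → List String → List String × Option String
  | 0, ext, path => (path, ext)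
  | fuel + 1, ext, path =>
    match ext with
    | some s =>
      if pvTruthy (some s) then
        match P.get? s with
        | some e => if memo.contains s then (path, some s) else bCollect P memo fuel e (path ++ [s])
        | none => (path, some s)
      else (path, some s)
    | none => (path, none)

-- `base = memo[ext] if (ext and ext in parent) else (1 if ext else 0)`
-- (memo[ext] via getD 0; the key is always present on Pre_, see Pre_ below)
def bBase (P : PySem.Dict String (Option String)) (memo : PySem.Dict String Int)
    (ext : Option String) : Int :=
  match ext with
  | some s =>
    if pvTruthy (some s) then
      match P.get? s with
      | some _ => (memo.get? s).getD 0
      | none => 1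
    else 0
  | none => 0

-- `for name in reversed(path): base += 1; memo[name] = base`
def bFill (memo : PySem.Dict String Int) (path : List String) (base : Int) :
    PySem.Dict String Int × Int :=
  path.reverse.foldl (fun mb name => (mb.1.insert name (mb.2 + 1), mb.2 + 1)) (memo, base)

-- B's `chain_value`, returning (value, updated memo)
def bF (P : PySem.Dict String (Option String)) (memo : PySem.Dict String Int)
    (fuel : Nat) (ext : Option String) : Int × PySem.Dict String Int :=
  let pe := bCollect P memo fuel ext []
  let mb := bFill memo pe.1 (bBase P memo pe.2)
  (mb.2, mb.1)

def calculate_inheritance_depth_py_alt (classes : List (List (String × Option String))) : Int :=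
  (classes.foldl
    (fun st cls =>
      let r := bF (bParent classes) st.1 (classes.length + 1) (pvDGet cls "extends")
      (r.2, max st.2 (1 + r.1)))
    (PySem.Dict.empty, (0 : Int))).2

-- ===== PRECONDITION & SPEC =====
-- one step along the extends graph (identity on terminal states)
def pvStep (classes : List (List (String × Option String))) (ext : Option String) :
    Option String :=
  if pvTruthy ext then
    match classes.find? (fun c => pvDGet c "name" == ext) with
    | some c => pvDGet c "extends"
    | none => ext
  else ext

-- a state on which A's while loop stops: falsy, or its name declared by no class
def pvStopped (classes : List (List (String × Option String))) (ext : Option String) : Bool :=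
  !(pvTruthy ext) || (classes.find? (fun c => pvDGet c "name" == ext)).isNone

-- the chain from ext reaches a terminal state within k steps
def pvStops (classes : List (List (String × Option String))) (k : Nat) (ext : Option String) :
    Bool :=
  (List.range (k + 1)).any (fun i => pvStopped classes ((pvStep classes)^[i] ext))

-- Pre_ excludes exactly the class lists whose extends chain cycles inside the list (some
-- chain never reaches a terminal state; a cycle-free chain visits distinct class names, so
-- it stops within classes.length steps): there Python A (and B) never returns (infinite loop).
def Pre_calculate_inheritance_depth_py (classes : List (List (String × Option String))) : Prop :=
  (classes.all (fun cls => pvStops classes classes.length (pvDGet cls "extends"))) = true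

instance (classes : List (List (String × Option String))) : Decidable (Pre_calculate_inheritance_depth_py classes) := by
  unfold Pre_calculate_inheritance_depth_py; infer_instance

def pvWitness_calculate_inheritance_depth_py : (List (List (String × Option String))) :=
  [[("name", some "A"), ("extends", some "B")], [("name", some "B"), ("extends", none)]]

def Spec_calculate_inheritance_depth_py (classes : List (List (String × Option String))) (out : Int) : Prop := out = calculate_inheritance_depth_py_alt classes
instance (classes : List (List (String × Option String))) (out : Int) : Decidable (Spec_calculate_inheritance_depth_py classes out) := by unfold Spec_calculate_inheritance_depth_py; infer_instance

-- ===== CLAIM (what is proved, stated in full; the proofs are below) =====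
def Claim_equal_calculate_inheritance_depth_py : Prop := ∀ (classes : List (List (String × Option String))), Dom_calculate_inheritance_depth_py classes → Pre_calculate_inheritance_depth_py classes → Spec_calculate_inheritance_depth_py classes (calculate_inheritance_depth_py classes)

-- ===== LEMMAS AND PROOFS =====

-- the value of the chain from ext, computed with fuel (proof-only abstraction of A's loop)
def pvVf (classes : List (List (String × Option String))) : Nat → Option String → Int
  | 0, _ => 0
  | k + 1, ext =>
    if pvTruthy ext then
      match classes.find? (fun c => pvDGet c "name" == ext) with
      | some c => 1 + pvVf classes k (pvDGet c "extends")
      | none => 1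
    else 0

-- every memo entry is the (fuel-stable) chain value of a stopping name
def pvInv (classes : List (List (String × Option String))) (memo : PySem.Dict String Int) :
    Prop :=
  ∀ s v, memo.get? s = some v →
    ∃ k, pvStops classes k (some s) = true ∧ v = pvVf classes (k + 1) (some s)

theorem pvVf_succ (classes : List (List (String × Option String))) (n : Nat)
    (ext : Option String) :
    pvVf classes (n + 1) ext =
      if pvTruthy ext then
        match classes.find? (fun c => pvDGet c "name" == ext) with
        | some c => 1 + pvVf classes n (pvDGet c "extends")
        | none => 1
      else 0 := rfl

theorem aChain_eq (classes : List (List (String × Option String))) (fuel : Nat) :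
    ∀ (ext : Option String) (d : Int),
      aChain classes fuel ext d = d + pvVf classes fuel ext := by
  induction fuel with
  | zero => intro ext d; simp [aChain, pvVf]
  | succ f ih =>
    intro ext d
    by_cases ht : pvTruthy ext = true
    · rcases hf : classes.find? (fun c => pvDGet c "name" == ext) with _ | c
      · simp [aChain, pvVf, ht, hf]
      · simp only [aChain, pvVf, ht, if_true, hf, ih]
        ring
    · simp [aChain, pvVf, ht]

theorem bParent_get?_aux (cs : List (List (String × Option String)))
    (d : PySem.Dict String (Option String)) (s : String) :
    (cs.foldl
      (fun parent cls =>
        match pvDGet cls "name" with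
        | some n => if parent.contains n then parent else parent.insert n (pvDGet cls "extends")
        | none => parent)
      d).get? s =
    (d.get? s).or
      ((cs.find? (fun c => pvDGet c "name" == some s)).map (fun c => pvDGet c "extends")) := by
  induction cs generalizing d with
  | nil => simp
  | cons c cs ih =>
    simp only [List.foldl_cons, List.find?]
    rcases hn : pvDGet c "name" with _ | n
    · simp [ih]
    · by_cases hns : n = s
      · subst hns
        simp only [beq_self_eq_true]
        by_cases hc : d.contains n
        · rcases hv : d.get? n with _ | v
          · exact absurd ((PySem.Dict.get?_eq_none_iff_contains d n).mp hv) (by simp [hc])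
          · simp [hc, ih, hv]
        · simp only [eq_false_of_ne_true hc, Bool.false_eq_true, if_false, ih]
          rw [PySem.Dict.get?_insert_self,
              (PySem.Dict.get?_eq_none_iff_contains d n).mpr (eq_false_of_ne_true hc)]
          simp
      · have hb : (some n == some s) = false := by simp [hns]
        simp only [hb]
        by_cases hc : d.contains n
        · simp [hc, ih]
        · simp only [eq_false_of_ne_true hc, Bool.false_eq_true, if_false, ih,
            PySem.Dict.get?_insert_of_ne d (pvDGet c "extends") (fun h => hns h.symm)]

theorem bParent_get? (classes : List (List (String × Option String))) (s : String) :
    (bParent classes).get? s =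
      (classes.find? (fun c => pvDGet c "name" == some s)).map (fun c => pvDGet c "extends") := by
  unfold bParent
  rw [bParent_get?_aux]
  simp

theorem stops_zero (classes : List (List (String × Option String))) (ext : Option String) :
    pvStops classes 0 ext = pvStopped classes ext := by
  simp [pvStops]

theorem stops_step (classes : List (List (String × Option String))) (k : Nat)
    (ext : Option String) (h : pvStops classes (k + 1) ext = true)
    (hns : pvStopped classes ext = false) :
    pvStops classes k (pvStep classes ext) = true := by
  simp only [pvStops, List.any_eq_true, List.mem_range] at h ⊢
  obtain ⟨i, hi, hst⟩ := h
  rcases i with _ | j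
  · simp only [Function.iterate_zero_apply] at hst
    rw [hst] at hns
    simp at hns
  · exact ⟨j, by omega, by rwa [← Function.iterate_succ_apply]⟩

theorem vf_stable (classes : List (List (String × Option String))) :
    ∀ (k : Nat) (ext : Option String), pvStops classes k ext = true →
      ∀ m, k + 1 ≤ m → pvVf classes m ext = pvVf classes (k + 1) ext := by
  intro k
  induction k with
  | zero =>
    intro ext h m hm
    rw [stops_zero] at h
    obtain ⟨m', rfl⟩ : ∃ m', m = m' + 1 := ⟨m - 1, by omega⟩
    simp only [pvStopped, Bool.or_eq_true, Bool.not_eq_true'] at h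
    rcases h with h | h
    · simp [pvVf, h]
    · rcases hf : classes.find? (fun c => pvDGet c "name" == ext) with _ | c
      · by_cases ht : pvTruthy ext = true <;> simp [pvVf, ht, hf]
      · simp [hf] at h
  | succ k ih =>
    intro ext h m hm
    obtain ⟨m', rfl⟩ : ∃ m', m = m' + 1 := ⟨m - 1, by omega⟩
    by_cases hst : pvStopped classes ext = true
    · simp only [pvStopped, Bool.or_eq_true, Bool.not_eq_true'] at hst
      rcases hst with h' | h'
      · simp [pvVf, h']
      · rcases hf : classes.find? (fun c => pvDGet c "name" == ext) with _ | c
        · by_cases ht : pvTruthy ext = true <;> simp [pvVf, ht, hf]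
        · simp [hf] at h'
    · have hns : pvStopped classes ext = false := by
        rwa [Bool.not_eq_true] at hst
      have hstep := stops_step classes k ext h hns
      have ht : pvTruthy ext = true := by
        rcases h' : pvTruthy ext with _ | _
        · simp [pvStopped, h'] at hns
        · rfl
      rcases hf : classes.find? (fun c => pvDGet c "name" == ext) with _ | c
      · simp [pvStopped, ht, hf] at hns
      · have hstepeq : pvStep classes ext = pvDGet c "extends" := by
          simp [pvStep, ht, hf]
        rw [hstepeq] at hstep
        rw [pvVf_succ classes m' ext, pvVf_succ classes (k + 1) ext]
        simp only [ht, if_true, hf]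
        rw [ih (pvDGet c "extends") hstep m' (by omega)]

-- moving the collect loop's accumulator out
theorem bCollect_acc (P : PySem.Dict String (Option String)) (memo : PySem.Dict String Int) :
    ∀ (fuel : Nat) (ext : Option String) (acc : List String),
      bCollect P memo fuel ext acc =
        (acc ++ (bCollect P memo fuel ext []).1, (bCollect P memo fuel ext []).2) := by
  intro fuel
  induction fuel with
  | zero => intro ext acc; simp [bCollect]
  | succ f ih =>
    intro ext acc
    rcases ext with _ | s
    · simp [bCollect]
    · by_cases ht : pvTruthy (some s) = true
      · simp only [bCollect, ht, if_true]
        rcases hp : P.get? s with _ | e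
        · simp
        · by_cases hm : memo.contains s = true
          · simp [hm]
          · simp only [eq_false_of_ne_true hm, Bool.false_eq_true, if_false,
              List.nil_append]
            rw [ih e (acc ++ [s]), ih e [s]]
            simp
      · simp [bCollect, ht]

theorem bFill_cons (memo : PySem.Dict String Int) (s : String) (p : List String) (b : Int) :
    bFill memo (s :: p) b =
      ((bFill memo p b).1.insert s ((bFill memo p b).2 + 1), (bFill memo p b).2 + 1) := by
  simp [bFill, List.foldl_append]

-- one-step unfolding of B's chain_value: it satisfies the memoized recursion
theorem bF_unfold (P : PySem.Dict String (Option String)) (memo : PySem.Dict String Int)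
    (fuel : Nat) (ext : Option String) :
    bF P memo (fuel + 1) ext =
      match ext with
      | none => (0, memo)
      | some s =>
        if pvTruthy (some s) then
          match P.get? s with
          | some e =>
            if memo.contains s then ((memo.get? s).getD 0, memo)
            else
              let r := bF P memo fuel e
              (r.1 + 1, r.2.insert s (r.1 + 1))
          | none => (1, memo)
        else (0, memo) := by
  rcases ext with _ | s
  · simp [bF, bCollect, bFill, bBase]
  · by_cases ht : pvTruthy (some s) = true
    · simp only [ht, if_true]
      rcases hp : P.get? s with _ | e
      · simp [bF, bCollect, ht, hp, bFill, bBase]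
      · by_cases hm : memo.contains s = true
        · simp [bF, bCollect, ht, hp, hm, bFill, bBase]
        · simp only [eq_false_of_ne_true hm, Bool.false_eq_true, if_false]
          show bF P memo (fuel + 1) (some s) =
            ((bF P memo fuel e).1 + 1, (bF P memo fuel e).2.insert s ((bF P memo fuel e).1 + 1))
          simp only [bF, bCollect, ht, if_true, hp, eq_false_of_ne_true hm, Bool.false_eq_true,
            if_false, List.nil_append]
          rw [bCollect_acc P memo fuel e [s]]
          simp only [List.singleton_append]
          rw [bFill_cons]
    · simp [bF, bCollect, ht, bFill, bBase]

-- the heart of the proof: chain_value returns the chain value and preserves the memo invariant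
theorem bF_correct (classes : List (List (String × Option String))) :
    ∀ (fuel k : Nat) (ext : Option String) (memo : PySem.Dict String Int),
      pvInv classes memo → pvStops classes k ext = true → k + 1 ≤ fuel →
      (bF (bParent classes) memo fuel ext).1 = pvVf classes (k + 1) ext ∧
      pvInv classes (bF (bParent classes) memo fuel ext).2 := by
  intro fuel
  induction fuel with
  | zero => intro k ext memo _ _ hle; omega
  | succ f ih =>
    intro k ext memo hinv hstops _
    rw [bF_unfold]
    rcases ext with _ | s
    · exact ⟨by simp [pvVf, pvTruthy], hinv⟩
    · by_cases ht : pvTruthy (some s) = true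
      · simp only [ht, if_true]
        rcases hp : (bParent classes).get? s with _ | e
        · -- name not declared in the list: chain value 1
          rw [bParent_get?] at hp
          rcases hf : classes.find? (fun c => pvDGet c "name" == some s) with _ | c
          · exact ⟨by simp [pvVf, ht, hf], hinv⟩
          · simp [hf] at hp
        · rw [bParent_get?] at hp
          rcases hf : classes.find? (fun c => pvDGet c "name" == some s) with _ | c
          · simp [hf] at hp
          · have he : e = pvDGet c "extends" := by
              simp only [hf, Option.map_some, Option.some.injEq] at hp
              exact hp.symm
            by_cases hm : memo.contains s = true
            · -- memo hit: the stored value is the chain value, by stability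
              simp only [hm, if_true]
              rcases hv : memo.get? s with _ | v
              · exact absurd ((PySem.Dict.get?_eq_none_iff_contains memo s).mp hv) (by simp [hm])
              · obtain ⟨k', hk's, hk'v⟩ := hinv s v hv
                refine ⟨?_, hinv⟩
                have h1 := vf_stable classes k (some s) hstops (max k k' + 1) (by omega)
                have h2 := vf_stable classes k' (some s) hk's (max k k' + 1) (by omega)
                simp [hk'v, ← h1, ← h2]
            · -- miss: recurse on the parent, then cache
              simp only [eq_false_of_ne_true hm, Bool.false_eq_true, if_false]
              have hns : pvStopped classes (some s) = false := by
                simp [pvStopped, ht, hf]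
              obtain ⟨k'', rfl⟩ : ∃ k'', k = k'' + 1 := by
                rcases k with _ | k''
                · rw [stops_zero, hns] at hstops; simp at hstops
                · exact ⟨k'', rfl⟩
              have hstep := stops_step classes k'' (some s) hstops hns
              have hstepeq : pvStep classes (some s) = pvDGet c "extends" := by
                simp [pvStep, ht, hf]
              rw [hstepeq, ← he] at hstep
              obtain ⟨hval, hinv'⟩ := ih k'' e memo hinv hstep (by omega)
              constructor
              · rw [pvVf_succ classes (k'' + 1)]
                simp only [ht, if_true, hf, ← he]
                rw [hval]
                ring
              · intro s' v' hgv
                by_cases hss : s' = s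
                · subst hss
                  rw [PySem.Dict.get?_insert_self] at hgv
                  refine ⟨k'' + 1, hstops, ?_⟩
                  have := hgv
                  simp only [Option.some.injEq] at this
                  rw [← this, hval, pvVf_succ classes (k'' + 1)]
                  simp only [ht, if_true, hf, ← he]
                  ring
                · rw [PySem.Dict.get?_insert_of_ne _ _ hss] at hgv
                  exact hinv' s' v' hgv
      · simp only [eq_false_of_ne_true ht, Bool.false_eq_true, if_false]
        exact ⟨by simp [pvVf, ht], hinv⟩

-- the top-level loops agree, threading the memo through B's fold
theorem fold_eq (classes : List (List (String × Option String))) :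
    ∀ (l : List (List (String × Option String))) (memo : PySem.Dict String Int) (best : Int),
      pvInv classes memo →
      (∀ cls ∈ l, pvStops classes classes.length (pvDGet cls "extends") = true) →
      (l.foldl
        (fun st cls =>
          let r := bF (bParent classes) st.1 (classes.length + 1) (pvDGet cls "extends")
          (r.2, max st.2 (1 + r.1)))
        (memo, best)).2 =
      l.foldl
        (fun max_depth cls =>
          max max_depth (aChain classes (classes.length + 1) (pvDGet cls "extends") 1))
        best := by
  intro l
  induction l with
  | nil => intro memo best _ _; rfl
  | cons cls l ih =>
    intro memo best hinv hall
    obtain ⟨hval, hinv'⟩ :=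
      bF_correct classes (classes.length + 1) classes.length (pvDGet cls "extends") memo hinv
        (hall cls (by simp)) (by omega)
    simp only [List.foldl_cons]
    rw [ih _ _ hinv' (fun c hc => hall c (by simp [hc]))]
    congr 1
    rw [hval, aChain_eq]

-- ===== VERDICT (by name: the statement is the Claim_ definition above) =====
theorem calculate_inheritance_depth_py_spec : Claim_equal_calculate_inheritance_depth_py := by
  intro classes _ hpre
  unfold Spec_calculate_inheritance_depth_py
  unfold calculate_inheritance_depth_py calculate_inheritance_depth_py_alt
  rw [fold_eq classes classes PySem.Dict.empty 0
    (fun s v hv => by simp at hv)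
    (fun cls hc => by
      unfold Pre_calculate_inheritance_depth_py at hpre
      rw [List.all_eq_true] at hpre
      exact hpre cls hc)]
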